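-- pv_equiv track=rewrite | github.com/dana-id/dana-python | dana/payment_gateway/v1/custom_validation.py | _pay_option_allowed_in_sandbox
-- ===== SOURCE A (Python) =====
-- from typing import Any, Callable, Dict, FrozenSet, List, Set
--
-- SANDBOX_ALLOWED_PAY_OPTIONS: FrozenSet[str] = frozenset({
--     'CARD', 'QRIS', 'BRI', 'PANIN', 'CIMB', 'MANDIRI', 'BTPN',
-- })
--
-- def _pay_option_allowed_in_sandbox(value: str) -> bool:
--     if not value or not str(value).strip():
--         return False
--     s = str(value).strip()
--     if s in SANDBOX_ALLOWED_PAY_OPTIONS: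
--         return True
--     for opt in SANDBOX_ALLOWED_PAY_OPTIONS:
--         if s.endswith('_' + opt):
--             return True
--     return False
-- ===== SOURCE B (Python) =====
-- from typing import FrozenSet
--
-- SANDBOX_ALLOWED_PAY_OPTIONS: FrozenSet[str] = frozenset({
--     'CARD', 'QRIS', 'BRI', 'PANIN', 'CIMB', 'MANDIRI', 'BTPN',
-- })
--
-- def _pay_option_allowed_in_sandbox(value: str) -> bool:
--     # One left-to-right pass: keep the segment after the most recent '_'
--     # (reset on every underscore), then one set lookup.  No guard needed:
--     # an empty/whitespace value yields segment '' which is never allowed.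
--     # Exact because no allowed option contains an underscore, so A's
--     # "equals an option or ends with '_'+option" is "last segment is an option".
--     segment = ''
--     for ch in str(value).strip():
--         segment = '' if ch == '_' else segment + ch
--     return segment in SANDBOX_ALLOWED_PAY_OPTIONS
-- ===== Notes on version B (the rewrite author's own statement) =====
-- stated objective: simpler
-- what changed: Replaced the direct membership test plus the 7-iteration endswith scan (and the explicit emptiness guard) by a single left-to-right fold that keeps the segment after the most recent underscore, followed by one set lookup; exact because no allowed option contains an underscore and the empty segment is never allowed.
import Mathlib
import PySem

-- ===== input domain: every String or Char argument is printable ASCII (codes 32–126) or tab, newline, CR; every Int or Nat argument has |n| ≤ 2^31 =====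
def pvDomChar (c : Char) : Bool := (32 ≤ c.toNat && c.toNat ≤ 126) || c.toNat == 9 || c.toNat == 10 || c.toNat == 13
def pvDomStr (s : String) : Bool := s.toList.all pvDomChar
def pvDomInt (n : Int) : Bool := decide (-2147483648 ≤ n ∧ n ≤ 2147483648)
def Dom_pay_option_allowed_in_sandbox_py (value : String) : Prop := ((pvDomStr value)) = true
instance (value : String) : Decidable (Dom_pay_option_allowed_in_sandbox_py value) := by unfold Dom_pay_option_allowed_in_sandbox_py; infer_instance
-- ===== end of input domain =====

-- B replaces the membership test + 7-way endswith scan (and the emptiness guard)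
-- by one left-to-right fold keeping the segment after the most recent underscore,
-- then a single membership test; objective: simpler.

-- SANDBOX_ALLOWED_PAY_OPTIONS (a frozenset of strings; iteration order is irrelevant
-- to A's result, the port fixes one order)
def pvOpts : List (List Char) :=
  ["CARD".toList, "QRIS".toList, "BRI".toList, "PANIN".toList, "CIMB".toList,
   "MANDIRI".toList, "BTPN".toList]

-- ===== PORT A =====
def pay_option_allowed_in_sandbox_py (value : String) : Bool :=
  if value == "" || PySem.Str.strip value == "" then false
  else
    let s := PySem.Chars.strip value.toList
    if pvOpts.contains s then true
    else pvOpts.any (fun opt => PySem.Chars.endswith s ('_' :: opt))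

-- ===== PORT B =====
def pay_option_allowed_in_sandbox_py_alt (value : String) : Bool :=
  -- hand port of the loop: segment = '' if ch == '_' else segment + ch, exact step for step
  let segment := (PySem.Chars.strip value.toList).foldl
    (fun acc c => if c == '_' then [] else acc ++ [c]) []
  pvOpts.contains segment

-- ===== PRECONDITION & SPEC =====
def Spec_pay_option_allowed_in_sandbox_py (value : String) (out : Bool) : Prop := out = pay_option_allowed_in_sandbox_py_alt value
instance (value : String) (out : Bool) : Decidable (Spec_pay_option_allowed_in_sandbox_py value out) := by unfold Spec_pay_option_allowed_in_sandbox_py; infer_instance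

-- ===== CLAIM (what is proved, stated in full; the proofs are below) =====
def Claim_equal_pay_option_allowed_in_sandbox_py : Prop := ∀ (value : String), Dom_pay_option_allowed_in_sandbox_py value → Spec_pay_option_allowed_in_sandbox_py value (pay_option_allowed_in_sandbox_py value)

-- ===== LEMMAS AND PROOFS =====

lemma pvOpts_no_underscore : ∀ o ∈ pvOpts, '_' ∉ o := by decide

-- the segment after the last '_' (all of s if there is none)
def pvTail (s : List Char) : List Char := (s.reverse.takeWhile (· != '_')).reverse

-- pvTail ignores a prepended character when the rest still contains '_'
lemma pv_tail_cons_mem (c : Char) (t : List Char) (ht : '_' ∈ t) :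
    pvTail (c :: t) = pvTail t := by
  unfold pvTail
  rw [List.reverse_cons, List.takeWhile_append]
  have h : ¬((t.reverse.takeWhile (· != '_')).length = t.reverse.length) := by
    intro hl
    have heq := (List.takeWhile_prefix (l := t.reverse) (p := (· != '_'))).eq_of_length hl
    have := List.takeWhile_eq_self_iff.mp heq '_' (List.mem_reverse.mpr ht)
    simp at this
  simp only [List.length_reverse] at h
  simp [h]

-- pvTail cuts everything at a final leading underscore
lemma pv_tail_underscore_cons (t : List Char) (ht : '_' ∉ t) :
    pvTail ('_' :: t) = t := by
  unfold pvTail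
  rw [List.reverse_cons, List.takeWhile_append]
  have h : t.reverse.takeWhile (· != '_') = t.reverse := by
    apply List.takeWhile_eq_self_iff.mpr
    intro a ha
    simp only [bne_iff_ne, ne_eq]
    intro hh; exact ht (by simpa [hh] using List.mem_reverse.mp ha)
  simp [h]

-- B's fold computes pvTail
lemma pv_foldl_eq_tail (s : List Char) (acc : List Char) :
    s.foldl (fun acc c => if c == '_' then [] else acc ++ [c]) acc
      = if '_' ∈ s then pvTail s else acc ++ s := by
  induction s generalizing acc with
  | nil => simp
  | cons c t ih =>
    rw [List.foldl_cons, ih]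
    by_cases hc : c = '_'
    · subst hc
      simp only [beq_self_eq_true, if_true, List.mem_cons, true_or, List.nil_append]
      by_cases ht : '_' ∈ t
      · rw [if_pos ht, pv_tail_cons_mem _ _ ht]
      · rw [if_neg ht, pv_tail_underscore_cons _ ht]
    · have hb : (c == '_') = false := by simpa using hc
      simp only [hb, Bool.false_eq_true, if_false]
      have hmem : ('_' ∈ c :: t) ↔ ('_' ∈ t) := by
        simp [List.mem_cons, Ne.symm hc]
      by_cases ht : '_' ∈ t
      · rw [if_pos ht, if_pos (hmem.mpr ht), pv_tail_cons_mem _ _ ht]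
      · rw [if_neg ht, if_neg (fun h => ht (hmem.mp h))]
        simp

-- pvTail of an underscore-free string is the string itself
lemma pv_tail_no_underscore (s : List Char) (hu : '_' ∉ s) : pvTail s = s := by
  unfold pvTail
  have : s.reverse.takeWhile (· != '_') = s.reverse := by
    apply List.takeWhile_eq_self_iff.mpr
    intro c hc
    simp only [bne_iff_ne, ne_eq]
    intro h; exact hu (by simpa [h] using List.mem_reverse.mp hc)
  rw [this, List.reverse_reverse]

-- per-option characterisation: for a string containing '_' and an underscore-free
-- option o, "ends with '_' + o" is "the piece after the last '_' is o"
lemma pv_endswith_iff_tail (s o : List Char) (hs : '_' ∈ s) (ho : '_' ∉ o) :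
    PySem.Chars.endswith s ('_' :: o) = true ↔ pvTail s = o := by
  unfold pvTail
  rw [PySem.Chars.endswith_iff]
  constructor
  · rintro ⟨t, ht⟩
    have hr : s.reverse = o.reverse ++ '_' :: t.reverse := by
      rw [← ht]; simp
    rw [hr, List.takeWhile_append]
    have hall : (o.reverse.takeWhile (· != '_')) = o.reverse := by
      apply List.takeWhile_eq_self_iff.mpr
      intro c hc
      simp only [bne_iff_ne, ne_eq]
      intro h; exact ho (by simpa [h] using (List.mem_reverse.mp hc))
    rw [hall]
    simp
  · intro htail
    have ht : s.reverse.takeWhile (· != '_') = o.reverse := by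
      simpa [List.reverse_eq_iff] using htail
    have hsplit := List.takeWhile_append_dropWhile (p := (· != '_')) (l := s.reverse)
    have hdne : s.reverse.dropWhile (· != '_') ≠ [] := by
      intro hnil
      have := List.dropWhile_eq_nil_iff.mp hnil '_' (List.mem_reverse.mpr hs)
      simp at this
    obtain ⟨c, rest, hcr⟩ := List.exists_cons_of_ne_nil hdne
    have hc : c = '_' := by
      have := List.head_dropWhile_not (p := (· != '_')) (l := s.reverse) (by rw [hcr]; simp)
      simp only [hcr, List.head_cons] at this
      simpa using this
    refine ⟨rest.reverse, ?_⟩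
    have hr : s.reverse = o.reverse ++ '_' :: rest := by
      rw [← hsplit, ht, hcr, hc]
    have h2 := congrArg List.reverse hr
    simp at h2
    simp [h2]

-- the key lemma: membership-or-suffix-scan equals one lookup of the last segment
lemma pv_key (s : List Char) :
    ((if pvOpts.contains s then true
      else pvOpts.any (fun opt => PySem.Chars.endswith s ('_' :: opt))))
    = pvOpts.contains (pvTail s) := by
  by_cases hu : '_' ∈ s
  · have hns : pvOpts.contains s = false := by
      simp only [List.contains_eq_mem, decide_eq_false_iff_not]
      intro hmem
      exact (pvOpts_no_underscore s hmem) hu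
    rw [hns]
    simp only [Bool.false_eq_true, if_false]
    rw [Bool.eq_iff_iff]
    simp only [List.any_eq_true, List.contains_eq_mem, decide_eq_true_eq]
    constructor
    · rintro ⟨o, ho, he⟩
      rw [(pv_endswith_iff_tail s o hu (pvOpts_no_underscore o ho))] at he
      rw [he]; exact ho
    · intro hmem
      exact ⟨_, hmem, (pv_endswith_iff_tail s _ hu
        (pvOpts_no_underscore _ hmem)).mpr rfl⟩
  · rw [pv_tail_no_underscore s hu]
    by_cases hm : pvOpts.contains s
    · simp only [hm, if_true]
    · simp only [hm, Bool.false_eq_true, if_false]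
      rw [Bool.eq_iff_iff]
      simp only [List.any_eq_true, Bool.false_eq_true, iff_false]
      rintro ⟨o, ho, he⟩
      rw [PySem.Chars.endswith_iff] at he
      exact hu (he.subset (by simp))

-- B's fold started from [] always computes pvTail
lemma pv_fold_eq_tail0 (s : List Char) :
    s.foldl (fun acc c => if c == '_' then [] else acc ++ [c]) [] = pvTail s := by
  rw [pv_foldl_eq_tail]
  by_cases hu : '_' ∈ s
  · rw [if_pos hu]
  · rw [if_neg hu, List.nil_append, pv_tail_no_underscore s hu]

-- ===== VERDICT (by name: the statement is the Claim_ definition above) =====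
theorem pay_option_allowed_in_sandbox_py_spec : Claim_equal_pay_option_allowed_in_sandbox_py := by
  intro value _
  unfold Spec_pay_option_allowed_in_sandbox_py
  unfold pay_option_allowed_in_sandbox_py pay_option_allowed_in_sandbox_py_alt
  simp only [pv_fold_eq_tail0]
  by_cases hg : (value == "" || PySem.Str.strip value == "") = true
  · -- guard fires: strip value = "" in both disjuncts, so pvTail = [] and B is false too
    have hstrip : PySem.Chars.strip value.toList = [] := by
      rcases Bool.or_eq_true_iff.mp hg with h | h
      · have : value = "" := by simpa using h
        subst this; rfl
      · have h2 : PySem.Str.strip value = "" := by simpa using h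
        have := congrArg String.toList h2
        rwa [PySem.Str.toList_strip] at this
    rw [if_pos hg, hstrip]
    decide
  · simp only [Bool.not_eq_true] at hg
    rw [hg]
    simp only [Bool.false_eq_true, if_false]
    exact pv_key _
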